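-- pv_equiv track=rewrite | github.com/goodStudyTnT/leetcode-tester | creator/cpp_creator.py | _convert_input_for_cpp
-- ===== SOURCE A (Python) =====
-- def _convert_input_for_cpp(input_type, input):
--     input = str(input)
--     input = input.replace("'", "")
--     input = input.replace("[", "{")
--     input = input.replace("]", "}")
--     input = input.replace("null", "NULL")
--
--     # 特判 TreeNode* + ListNode*
--     if "TreeNode" in input_type or "ListNode" in input_type:
--         keyword = "TreeNode" if "TreeNode" in input_type else "ListNode"
--         # 找到包围数字的 { }
--         # 有可能是 vector<vector<TreeNode*>> -》 {{{1, 2, 3}, {4, 5, 6}}, {{9, 9, 9}, {8, 9, 10}}}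
--         brackets = []
--         need_update = []
--         for idx, c in enumerate(input):
--             if c == '{':
--                 brackets.append((idx, c))
--             elif c == '}':
--                 if brackets[-1][1] == '{':  # 是包围的
--                     left_idx = brackets[-1][0]
--                     need_update.append((left_idx, idx))
--                 brackets.append((idx, c))
--
--         update_idx = 0
--         real_input = ""
--         for idx, c in enumerate(input):
--             if update_idx < len(need_update):
--                 if idx == need_update[update_idx][0]:
--                     real_input += f"new {keyword}(" + c
--                 elif idx == need_update[update_idx][1]:
--                     real_input += f"{c})"
--                     update_idx += 1
--                 else:
--                     real_input += c
--             else: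
--                 real_input += c
--         input = real_input
--     return input
-- ===== SOURCE B (Python) =====
-- def _convert_input_for_cpp(input_type, input):
--     input = str(input)
--     input = input.replace("'", "")
--     input = input.replace("[", "{")
--     input = input.replace("]", "}")
--     input = input.replace("null", "NULL")
--
--     if "TreeNode" in input_type or "ListNode" in input_type:
--         keyword = "TreeNode" if "TreeNode" in input_type else "ListNode"
--         # Single left-to-right pass: `buf` buffers the text since the most
--         # recent '{' not yet followed by any other brace; when that '{' is
--         # closed directly (an innermost pair) the buffered "{...}" is emitted
--         # wrapped as "new keyword({...})", otherwise the buffer is flushed plain.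
--         out = []
--         buf = None
--         for c in input:
--             if c == '{':
--                 if buf is not None:
--                     out.append(buf)
--                 buf = '{'
--             elif c == '}':
--                 if buf is not None:
--                     out.append(f"new {keyword}({buf}" + "})")
--                     buf = None
--                 else:
--                     out.append('}')
--             elif buf is not None:
--                 buf += c
--             else:
--                 out.append(c)
--         if buf is not None:
--             out.append(buf)
--         input = ''.join(out)
--     return input
-- ===== Notes on version B (the rewrite author's own statement) =====
-- stated objective: simpler
-- what changed: A's two passes (stack-collect the innermost '{...}' pairs by index, then rebuild the string matching indices against that list) are replaced by one pass with a single optional buffer holding the text since the last directly-open '{', wrapped on its direct close.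
import Mathlib
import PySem

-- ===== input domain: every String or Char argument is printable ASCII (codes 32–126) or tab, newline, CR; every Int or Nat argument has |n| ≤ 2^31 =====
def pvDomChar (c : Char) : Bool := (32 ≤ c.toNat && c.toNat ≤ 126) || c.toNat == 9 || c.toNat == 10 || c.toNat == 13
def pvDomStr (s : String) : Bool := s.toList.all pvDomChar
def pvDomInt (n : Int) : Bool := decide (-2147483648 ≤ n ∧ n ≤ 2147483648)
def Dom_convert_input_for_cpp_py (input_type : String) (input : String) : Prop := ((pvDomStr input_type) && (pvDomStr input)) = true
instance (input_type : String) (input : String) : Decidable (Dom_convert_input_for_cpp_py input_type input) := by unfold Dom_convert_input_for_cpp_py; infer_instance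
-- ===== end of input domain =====

-- B replaces A's two index-matched passes (stack-collect leaf brace pairs, then rebuild by
-- position) by one pass with a single optional buffer holding the text since the last
-- directly-open '{'; objective: simpler (return value only; neither version mutates its arguments).

-- ===== PORT A =====
-- shared prefix of both Pythons: the four str.replace calls, the branch test, the keyword choice
def pvTransform (input : String) : String :=
  PySem.Str.replace (PySem.Str.replace (PySem.Str.replace (PySem.Str.replace input "'" "") "[" "{") "]" "}") "null" "NULL"

def pvBranch (input_type : String) : Bool :=
  PySem.Str.isIn "TreeNode" input_type || PySem.Str.isIn "ListNode" input_type

def pvKeyword (input_type : String) : String :=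
  if PySem.Str.isIn "TreeNode" input_type then "TreeNode" else "ListNode"

-- first pass of A: `brackets` is the Python list with its LAST element at the head (a stack:
-- Python only appends and reads brackets[-1]); `need` keeps Python's append-at-end order.
def pvPass1Step (st : Nat × List (Nat × Char) × List (Nat × Nat)) (c : Char) :
    Nat × List (Nat × Char) × List (Nat × Nat) :=
  match st with
  | (idx, brackets, need) =>
    if c = '{' then (idx + 1, (idx, c) :: brackets, need)
    else if c = '}' then
      match brackets with
      | (l, bc) :: _ =>
          if bc = '{' then (idx + 1, (idx, c) :: brackets, need ++ [(l, idx)])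
          else (idx + 1, (idx, c) :: brackets, need)
      | [] => (idx + 1, (idx, c) :: brackets, need)
        -- Python raises IndexError here (brackets[-1] on an empty list); Pre_ excludes these inputs
    else (idx + 1, brackets, need)

-- second pass of A: state (idx, update_idx, real_input)
def pvPass2Step (kw : List Char) (need : List (Nat × Nat)) (st : Nat × Nat × List Char) (c : Char) :
    Nat × Nat × List Char :=
  match st with
  | (idx, u, real) =>
    if u < need.length then
      let p := need.getD u (0, 0)
      if idx = p.1 then (idx + 1, u, real ++ ("new ".toList ++ kw ++ ['(', c]))
      else if idx = p.2 then (idx + 1, u + 1, real ++ [c, ')'])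
      else (idx + 1, u, real ++ [c])
    else (idx + 1, u, real ++ [c])

def convert_input_for_cpp_py (input_type : String) (input : String) : String :=
  let s := pvTransform input
  if pvBranch input_type then
    let kw := (pvKeyword input_type).toList
    let need := (s.toList.foldl pvPass1Step (0, [], [])).2.2
    let real := (s.toList.foldl (pvPass2Step kw need) (0, 0, [])).2.2
    String.ofList real
  else s

-- ===== PORT B =====
-- single pass: state (out, buf); buf = some b buffers the text since the most recent '{'
-- not yet followed by another brace
def pvBStep (kw : List Char) (st : List Char × Option (List Char)) (c : Char) :
    List Char × Option (List Char) :=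
  match st with
  | (out, buf) =>
    if c = '{' then
      match buf with
      | some b => (out ++ b, some ['{'])
      | none => (out, some ['{'])
    else if c = '}' then
      match buf with
      | some b => (out ++ "new ".toList ++ kw ++ ['('] ++ b ++ ['}', ')'], none)
      | none => (out ++ ['}'], none)
    else
      match buf with
      | some b => (out, some (b ++ [c]))
      | none => (out ++ [c], none)

def convert_input_for_cpp_py_alt (input_type : String) (input : String) : String :=
  let s := pvTransform input
  if pvBranch input_type then
    let kw := (pvKeyword input_type).toList
    let st := s.toList.foldl (pvBStep kw) ([], none)
    String.ofList (match st.2 with | some b => st.1 ++ b | none => st.1)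
  else s

-- ===== PRECONDITION & SPEC =====
def pvIsBrace (c : Char) : Bool := c == '[' || c == '{' || c == ']' || c == '}'
def pvFirstBrace (input : String) : Option Char := (input.toList.filter pvIsBrace).head?

-- Pre_ excludes exactly the inputs on which A raises IndexError (brackets[-1] on an empty
-- stack): in the TreeNode/ListNode branch, a closing bracket occurring before any opening one.
def Pre_convert_input_for_cpp_py (input_type : String) (input : String) : Prop :=
  pvBranch input_type = true → (pvFirstBrace input ≠ some ']' ∧ pvFirstBrace input ≠ some '}')
instance (input_type : String) (input : String) : Decidable (Pre_convert_input_for_cpp_py input_type input) := by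
  unfold Pre_convert_input_for_cpp_py; infer_instance

def pvWitness_convert_input_for_cpp_py : String × String := ("TreeNode*", "[1, 2, null]")

def Spec_convert_input_for_cpp_py (input_type : String) (input : String) (out : String) : Prop :=
  out = convert_input_for_cpp_py_alt input_type input
instance (input_type : String) (input : String) (out : String) : Decidable (Spec_convert_input_for_cpp_py input_type input out) := by
  unfold Spec_convert_input_for_cpp_py; infer_instance

-- ===== CLAIM (what is proved, stated in full; the proofs are below) =====
def Claim_equal_convert_input_for_cpp_py : Prop := ∀ (input_type : String) (input : String), Dom_convert_input_for_cpp_py input_type input → Pre_convert_input_for_cpp_py input_type input → Spec_convert_input_for_cpp_py input_type input (convert_input_for_cpp_py input_type input)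

-- ===== LEMMAS AND PROOFS =====

-- abstraction of A's bracket stack: the index of the top '{', if the top is a '{'
def pvAbs (bs : List (Nat × Char)) : Option Nat :=
  match bs with
  | (l, c) :: _ => if c = '{' then some l else none
  | [] => none

-- A's need_update list as a structural recursion
def pvP1 (opn : Option Nat) (n : Nat) : List Char → List (Nat × Nat)
  | [] => []
  | c :: cs =>
    if c = '{' then pvP1 (some n) (n + 1) cs
    else if c = '}' then
      match opn with
      | some l => (l, n) :: pvP1 none (n + 1) cs
      | none => pvP1 none (n + 1) cs
    else pvP1 opn (n + 1) cs

-- A's second pass as a structural recursion consuming the pending pairs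
def pvR2 (kw : List Char) : List (Nat × Nat) → Nat → List Char → List Char
  | _, _, [] => []
  | [], n, c :: cs => c :: pvR2 kw [] (n + 1) cs
  | (a, r) :: tl, n, c :: cs =>
    if n = a then "new ".toList ++ kw ++ ['(', c] ++ pvR2 kw ((a, r) :: tl) (n + 1) cs
    else if n = r then [c, ')'] ++ pvR2 kw tl (n + 1) cs
    else c :: pvR2 kw ((a, r) :: tl) (n + 1) cs

-- B's output as a structural recursion
def pvBO (kw : List Char) : Option (List Char) → List Char → List Char
  | buf, [] => (match buf with | some b => b | none => [])
  | buf, c :: cs =>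
    if c = '{' then (match buf with | some b => b | none => []) ++ pvBO kw (some ['{']) cs
    else if c = '}' then
      match buf with
      | some b => "new ".toList ++ kw ++ ['('] ++ b ++ ['}', ')'] ++ pvBO kw none cs
      | none => '}' :: pvBO kw none cs
    else
      match buf with
      | some b => pvBO kw (some (b ++ [c])) cs
      | none => c :: pvBO kw none cs

-- what B computes from an open buffer, phrased on A's side (wrap iff the pending '{' closes)
def pvW (kw : List Char) (l : Nat) (b : List Char) (n : Nat) (cs : List Char) : List Char :=
  match pvP1 (some l) n cs with
  | [] => b ++ pvR2 kw [] n cs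
  | (a, r) :: tl =>
    if a = l then "new ".toList ++ kw ++ ['('] ++ b ++ pvR2 kw ((a, r) :: tl) n cs
    else b ++ pvR2 kw ((a, r) :: tl) n cs

lemma pvP1_bounds : ∀ (cs : List Char) (opn : Option Nat) (n : Nat) (p : Nat × Nat),
    p ∈ pvP1 opn n cs → n ≤ p.2 ∧ (opn = some p.1 ∨ n ≤ p.1) := by
  intro cs
  induction cs with
  | nil => intro opn n p h; simp [pvP1] at h
  | cons c cs ih =>
    intro opn n p h
    by_cases h1 : c = '{'
    · simp only [pvP1, h1, if_true] at h
      obtain ⟨hr, hl⟩ := ih (some n) (n + 1) p h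
      refine ⟨by omega, Or.inr ?_⟩
      rcases hl with h' | h'
      · simp at h'; omega
      · omega
    · by_cases h2 : c = '}'
      · simp only [pvP1, h1, h2, if_false, if_true, reduceIte] at h
        cases opn with
        | some l =>
          rcases List.mem_cons.1 h with h | h
          · subst h; exact ⟨le_refl _, Or.inl rfl⟩
          · obtain ⟨hr, hl⟩ := ih none (n + 1) p h
            refine ⟨by omega, Or.inr ?_⟩
            rcases hl with h' | h'
            · exact absurd h' (by simp)
            · omega
        | none =>
          obtain ⟨hr, hl⟩ := ih none (n + 1) p h
          refine ⟨by omega, Or.inr ?_⟩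
          rcases hl with h' | h'
          · exact absurd h' (by simp)
          · omega
      · simp only [pvP1, h1, h2, if_false, reduceIte] at h
        obtain ⟨hr, hl⟩ := ih opn (n + 1) p h
        refine ⟨by omega, ?_⟩
        rcases hl with h' | h'
        · exact Or.inl h'
        · exact Or.inr (by omega)

lemma pvPass1_eq : ∀ (cs : List Char) (n : Nat) (bs : List (Nat × Char)) (nd : List (Nat × Nat)),
    (cs.foldl pvPass1Step (n, bs, nd)).2.2 = nd ++ pvP1 (pvAbs bs) n cs := by
  intro cs
  induction cs with
  | nil => intro n bs nd; simp [pvP1]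
  | cons c cs ih =>
    intro n bs nd
    rw [List.foldl_cons]
    by_cases h1 : c = '{'
    · simp only [pvPass1Step, h1, if_true]
      rw [ih]
      simp [pvAbs, pvP1]
    · by_cases h2 : c = '}'
      · simp only [pvPass1Step, h1, h2, if_false, if_true, reduceIte]
        cases bs with
        | nil =>
          rw [ih]
          simp [pvAbs, pvP1, h1, h2]
        | cons hd tl =>
          obtain ⟨l, bc⟩ := hd
          by_cases h3 : bc = '{'
          · simp only [h3, if_true, reduceIte]
            rw [ih]
            simp [pvAbs, pvP1, h1, h2, h3]
          · simp only [h3, if_false, reduceIte]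
            rw [ih]
            simp [pvAbs, pvP1, h1, h2, h3]
      · simp only [pvPass1Step, h1, h2, if_false, reduceIte]
        rw [ih]
        simp [pvP1, h1, h2]

lemma pvPass2_eq (kw : List Char) (nd : List (Nat × Nat)) :
    ∀ (cs : List Char) (n u : Nat) (r : List Char),
    (cs.foldl (pvPass2Step kw nd) (n, u, r)).2.2 = r ++ pvR2 kw (nd.drop u) n cs := by
  intro cs
  induction cs with
  | nil => intro n u r; simp [pvR2]
  | cons c cs ih =>
    intro n u r
    rw [List.foldl_cons]
    cases hd : nd.drop u with
    | nil =>
      have hu : ¬ u < nd.length := by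
        have := List.drop_eq_nil_iff.1 hd; omega
      simp only [pvPass2Step, hu, if_false, reduceIte]
      rw [ih]
      have hd' : nd.drop (u + 1) = [] := by
        rw [List.drop_eq_nil_iff] at hd ⊢; omega
      rw [hd'] at *
      rw [hd]
      simp [pvR2]
    | cons p tl =>
      have hu : u < nd.length := by
        by_contra hu
        rw [List.drop_eq_nil_iff.2 (by omega)] at hd; simp at hd
      have hget : nd.getD u (0, 0) = p := by
        have h1 : nd[u]? = some p := by
          rw [← List.head?_drop, hd]; rfl
        simp [List.getD_eq_getElem?_getD, h1]
      have htl : nd.drop (u + 1) = tl := by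
        have : nd.drop (u + 1) = (nd.drop u).drop 1 := by
          rw [List.drop_drop]
        rw [this, hd]; rfl
      obtain ⟨a, rr⟩ := p
      simp only [pvPass2Step, hu, if_true, hget, reduceIte]
      by_cases hna : n = a
      · simp only [hna, if_true, reduceIte]
        rw [ih, hd]
        simp [pvR2, hna]
      · by_cases hnr : n = rr
        · rw [if_neg hna, if_pos hnr]
          rw [ih, htl]
          simp only [pvR2]
          rw [if_neg (by omega : ¬ n = a), if_pos hnr]
          simp
        · simp only [hna, hnr, if_false, reduceIte]
          rw [ih, hd]
          simp [pvR2, hna, hnr]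

lemma pvB_eq (kw : List Char) : ∀ (cs : List Char) (out : List Char) (buf : Option (List Char)),
    (match (cs.foldl (pvBStep kw) (out, buf)).2 with
     | some b => (cs.foldl (pvBStep kw) (out, buf)).1 ++ b
     | none => (cs.foldl (pvBStep kw) (out, buf)).1) = out ++ pvBO kw buf cs := by
  intro cs
  induction cs with
  | nil =>
    intro out buf
    cases buf <;> simp [pvBO]
  | cons c cs ih =>
    intro out buf
    rw [List.foldl_cons]
    by_cases h1 : c = '{'
    · cases buf with
      | some b =>
        simp only [pvBStep, h1, if_true, reduceIte]
        rw [ih]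
        simp [pvBO, h1]
      | none =>
        simp only [pvBStep, h1, if_true, reduceIte]
        rw [ih]
        simp [pvBO, h1]
    · by_cases h2 : c = '}'
      · cases buf with
        | some b =>
          simp only [pvBStep, h1, h2, if_false, if_true, reduceIte]
          rw [ih]
          simp [pvBO, h1, h2]
        | none =>
          simp only [pvBStep, h1, h2, if_false, if_true, reduceIte]
          rw [ih]
          simp [pvBO, h1, h2]
      · cases buf with
        | some b =>
          simp only [pvBStep, h1, h2, if_false, reduceIte]
          rw [ih]
          simp [pvBO, h1, h2]
        | none =>
          simp only [pvBStep, h1, h2, if_false, reduceIte]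
          rw [ih]
          simp [pvBO, h1, h2]

lemma pvBO_brace (kw : List Char) (buf : Option (List Char)) (cs : List Char) :
    pvBO kw buf ('{' :: cs) = (match buf with | some b => b | none => []) ++ pvBO kw (some ['{']) cs := by
  simp [pvBO]

lemma pvBO_close_some (kw b : List Char) (cs : List Char) :
    pvBO kw (some b) ('}' :: cs) = "new ".toList ++ kw ++ ['('] ++ b ++ ['}', ')'] ++ pvBO kw none cs := by
  simp [pvBO]

lemma pvBO_close_none (kw : List Char) (cs : List Char) :
    pvBO kw none ('}' :: cs) = '}' :: pvBO kw none cs := by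
  simp [pvBO]

lemma pvBO_other_some (kw b : List Char) {c : Char} (cs : List Char) (h1 : ¬ c = '{') (h2 : ¬ c = '}') :
    pvBO kw (some b) (c :: cs) = pvBO kw (some (b ++ [c])) cs := by
  simp [pvBO, h1, h2]

lemma pvBO_other_none (kw : List Char) {c : Char} (cs : List Char) (h1 : ¬ c = '{') (h2 : ¬ c = '}') :
    pvBO kw none (c :: cs) = c :: pvBO kw none cs := by
  simp [pvBO, h1, h2]

lemma pvP1_brace (opn : Option Nat) (n : Nat) (cs : List Char) :
    pvP1 opn n ('{' :: cs) = pvP1 (some n) (n + 1) cs := by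
  simp [pvP1]

lemma pvP1_close_some (l n : Nat) (cs : List Char) :
    pvP1 (some l) n ('}' :: cs) = (l, n) :: pvP1 none (n + 1) cs := by
  simp [pvP1]

lemma pvP1_close_none (n : Nat) (cs : List Char) :
    pvP1 none n ('}' :: cs) = pvP1 none (n + 1) cs := by
  simp [pvP1]

lemma pvP1_other (opn : Option Nat) (n : Nat) {c : Char} (cs : List Char) (h1 : ¬ c = '{') (h2 : ¬ c = '}') :
    pvP1 opn n (c :: cs) = pvP1 opn (n + 1) cs := by
  simp [pvP1, h1, h2]

lemma pvR2_nil_cons (kw : List Char) (n : Nat) (c : Char) (cs : List Char) :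
    pvR2 kw [] n (c :: cs) = c :: pvR2 kw [] (n + 1) cs := by
  simp [pvR2]

lemma pvR2_copy (kw : List Char) {a r n : Nat} (tl : List (Nat × Nat)) (c : Char) (cs : List Char)
    (h1 : ¬ n = a) (h2 : ¬ n = r) :
    pvR2 kw ((a, r) :: tl) n (c :: cs) = c :: pvR2 kw ((a, r) :: tl) (n + 1) cs := by
  simp [pvR2, h1, h2]

lemma pvR2_open (kw : List Char) {a r : Nat} (tl : List (Nat × Nat)) (c : Char) (cs : List Char) :
    pvR2 kw ((a, r) :: tl) a (c :: cs) = "new ".toList ++ kw ++ ['(', c] ++ pvR2 kw ((a, r) :: tl) (a + 1) cs := by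
  simp [pvR2]

lemma pvR2_close (kw : List Char) {a r : Nat} (tl : List (Nat × Nat)) (c : Char) (cs : List Char)
    (h1 : ¬ r = a) :
    pvR2 kw ((a, r) :: tl) r (c :: cs) = c :: ')' :: pvR2 kw tl (r + 1) cs := by
  simp [pvR2, h1]


lemma pvW_nil {l n : Nat} {cs : List Char} (kw b : List Char) (h : pvP1 (some l) n cs = []) :
    pvW kw l b n cs = b ++ pvR2 kw [] n cs := by
  simp [pvW, h]

lemma pvW_cons {l n a r : Nat} {tl : List (Nat × Nat)} {cs : List Char} (kw b : List Char)
    (h : pvP1 (some l) n cs = (a, r) :: tl) :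
    pvW kw l b n cs = if a = l then "new ".toList ++ kw ++ ['('] ++ b ++ pvR2 kw ((a, r) :: tl) n cs
      else b ++ pvR2 kw ((a, r) :: tl) n cs := by
  simp [pvW, h]

lemma pvMain (kw : List Char) : ∀ (cs : List Char) (n : Nat),
    pvBO kw none cs = pvR2 kw (pvP1 none n cs) n cs ∧
    (∀ (l : Nat) (b : List Char), l < n → pvBO kw (some b) cs = pvW kw l b n cs) := by
  intro cs
  induction cs with
  | nil =>
    intro n
    refine ⟨by simp [pvBO, pvP1, pvR2], ?_⟩
    intro l b _
    simp [pvBO, pvW, pvP1, pvR2]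
  | cons c cs ih =>
    intro n
    constructor
    · by_cases h1 : c = '{'
      · subst h1
        rw [pvBO_brace, pvP1_brace, (ih (n + 1)).2 n ['{'] (Nat.lt_succ_self n)]
        cases hnd : pvP1 (some n) (n + 1) cs with
        | nil => rw [pvW_nil kw ['{'] hnd, pvR2_nil_cons]; simp
        | cons p tl =>
          obtain ⟨a, r⟩ := p
          obtain ⟨hr, hl⟩ := pvP1_bounds cs (some n) (n + 1) (a, r) (by rw [hnd]; exact List.mem_cons_self)
          have hr' : n + 1 ≤ r := hr
          simp only [Option.some.injEq] at hl
          rw [pvW_cons kw ['{'] hnd]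
          by_cases ha : a = n
          · subst ha
            rw [if_pos rfl, pvR2_open]
            simp
          · have ha' : n + 1 ≤ a := by rcases hl with h | h <;> omega
            rw [if_neg ha, pvR2_copy kw tl _ cs (by omega) (by omega)]
            simp
      · by_cases h2 : c = '}'
        · subst h2
          rw [pvBO_close_none, pvP1_close_none, (ih (n + 1)).1]
          cases hnd : pvP1 none (n + 1) cs with
          | nil => rw [pvR2_nil_cons]
          | cons p tl =>
            obtain ⟨a, r⟩ := p
            obtain ⟨hr, hl⟩ := pvP1_bounds cs none (n + 1) (a, r) (by rw [hnd]; exact List.mem_cons_self)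
            have hr' : n + 1 ≤ r := hr
            have ha : n + 1 ≤ a := by
              rcases hl with h | h
              · exact absurd h (by simp)
              · exact h
            rw [pvR2_copy kw tl _ cs (by omega) (by omega)]
        · rw [pvBO_other_none kw cs h1 h2, pvP1_other none n cs h1 h2, (ih (n + 1)).1]
          cases hnd : pvP1 none (n + 1) cs with
          | nil => rw [pvR2_nil_cons]
          | cons p tl =>
            obtain ⟨a, r⟩ := p
            obtain ⟨hr, hl⟩ := pvP1_bounds cs none (n + 1) (a, r) (by rw [hnd]; exact List.mem_cons_self)
            have hr' : n + 1 ≤ r := hr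
            have ha : n + 1 ≤ a := by
              rcases hl with h | h
              · exact absurd h (by simp)
              · exact h
            rw [pvR2_copy kw tl _ cs (by omega) (by omega)]
    · intro l b hlb
      by_cases h1 : c = '{'
      · subst h1
        rw [pvBO_brace, (ih (n + 1)).2 n ['{'] (Nat.lt_succ_self n)]
        have hb : pvP1 (some l) n ('{' :: cs) = pvP1 (some n) (n + 1) cs := pvP1_brace _ _ _
        cases hnd : pvP1 (some n) (n + 1) cs with
        | nil => rw [pvW_nil kw ['{'] hnd, pvW_nil kw b (hb.trans hnd), pvR2_nil_cons]; simp
        | cons p tl =>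
          obtain ⟨a, r⟩ := p
          obtain ⟨hr, hl⟩ := pvP1_bounds cs (some n) (n + 1) (a, r) (by rw [hnd]; exact List.mem_cons_self)
          have hr' : n + 1 ≤ r := hr
          simp only [Option.some.injEq] at hl
          have ha : n ≤ a := by rcases hl with h | h <;> omega
          rw [pvW_cons kw ['{'] hnd, pvW_cons kw b (hb.trans hnd), if_neg (by omega : ¬ a = l)]
          by_cases han : a = n
          · subst han
            rw [if_pos rfl, pvR2_open]
            simp
          · rw [if_neg han, pvR2_copy kw tl _ cs (by omega) (by omega)]
            simp
      · by_cases h2 : c = '}'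
        · subst h2
          rw [pvBO_close_some, (ih (n + 1)).1]
          have hc : pvP1 (some l) n ('}' :: cs) = (l, n) :: pvP1 none (n + 1) cs := pvP1_close_some _ _ _
          rw [pvW_cons kw b hc, if_pos rfl, pvR2_close kw _ _ (h1 := by omega)]
          simp
        · rw [pvBO_other_some kw b cs h1 h2, (ih (n + 1)).2 l (b ++ [c]) (by omega)]
          have ho : pvP1 (some l) n (c :: cs) = pvP1 (some l) (n + 1) cs := pvP1_other _ _ _ h1 h2
          cases hnd : pvP1 (some l) (n + 1) cs with
          | nil => rw [pvW_nil kw (b ++ [c]) hnd, pvW_nil kw b (ho.trans hnd), pvR2_nil_cons]; simp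
          | cons p tl =>
            obtain ⟨a, r⟩ := p
            obtain ⟨hr, hl⟩ := pvP1_bounds cs (some l) (n + 1) (a, r) (by rw [hnd]; exact List.mem_cons_self)
            have hr' : n + 1 ≤ r := hr
            simp only [Option.some.injEq] at hl
            rw [pvW_cons kw (b ++ [c]) hnd, pvW_cons kw b (ho.trans hnd)]
            by_cases hal : a = l
            · rw [if_pos hal, if_pos hal, pvR2_copy kw tl _ cs (by omega) (by omega)]
              simp
            · have ha' : n + 1 ≤ a := by rcases hl with h | h <;> omega
              rw [if_neg hal, if_neg hal, pvR2_copy kw tl _ cs (by omega) (by omega)]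
              simp

-- ===== VERDICT (by name: the statement is the Claim_ definition above) =====
theorem convert_input_for_cpp_py_spec : Claim_equal_convert_input_for_cpp_py := by
  intro input_type input _ _
  unfold Spec_convert_input_for_cpp_py convert_input_for_cpp_py convert_input_for_cpp_py_alt
  by_cases hb : pvBranch input_type <;> simp only [hb, if_true, if_false, Bool.false_eq_true]
  have h1 := pvPass1_eq (pvTransform input).toList 0 [] []
  have h2 := pvPass2_eq ((pvKeyword input_type).toList)
      (((pvTransform input).toList.foldl pvPass1Step (0, [], [])).2.2)
      (pvTransform input).toList 0 0 []
  have h3 := pvB_eq ((pvKeyword input_type).toList) (pvTransform input).toList [] none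
  have h4 := (pvMain ((pvKeyword input_type).toList) (pvTransform input).toList 0).1
  simp only [pvAbs, List.nil_append, List.drop_zero] at h1 h2 h3
  rw [h2, h1, ← h4] at *
  exact congrArg String.ofList (by rw [← h3])
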